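-- pv_equiv track=rewrite | github.com/ACea15/FENIAX | fem4inas/intrinsic/geometry.py | compute_clamped
-- ===== SOURCE A (Python) =====
-- def compute_clamped(fe_order: list[int]) -> (list[int], dict[str: list]):
--     clamped_nodes = list()
--     freeDoF = dict()
--     for i in fe_order:
--         if i < 0:
--             clamped_nodes.append(i)
--     for ni in clamped_nodes:
--         fe_ni = str(abs(fe_order[ni]))
--         if len(fe_ni) == 6: # 100100 format with 1 being DoF clamped
--             # picks the index of free DoF
--             freeDoF[ni] = [i for i,j in enumerate(fe_ni) if j =='0']
--         else:
--             freeDoF[ni] = []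
--     return clamped_nodes, freeDoF
-- ===== SOURCE B (Python) =====
-- def _free_dof(v: int) -> list:
--     # Arithmetic digit test: a 6-digit number is one between 100000 and 999999; digit k
--     # (most significant first) is v // 10**(5-k) % 10 -- no string conversion.
--     if 100000 <= v <= 999999:
--         return [k for k in range(6) if v // 10 ** (5 - k) % 10 == 0]
--     return []
--
--
-- def compute_clamped(fe_order: list[int]) -> (list[int], dict):
--     n = len(fe_order)
--     clamped_nodes = [i for i in fe_order if i < 0]
--     freeDoF = {i: _free_dof(abs(fe_order[n + i])) for i in clamped_nodes}
--     return clamped_nodes, freeDoF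
-- ===== Notes on version B (the rewrite author's own statement) =====
-- stated objective: alternative
-- what changed: B replaces A's string processing (str(abs(v)), len==6 test, enumerate-filter over characters) by pure integer arithmetic -- a 6-digit number is one between 100000 and 999999 and digit k is v // 10**(5-k) % 10 -- and builds the result with a list comprehension plus a dict comprehension over positive indices fe_order[len+i] instead of A's two mutating loops with negative indexing.
import Mathlib
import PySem

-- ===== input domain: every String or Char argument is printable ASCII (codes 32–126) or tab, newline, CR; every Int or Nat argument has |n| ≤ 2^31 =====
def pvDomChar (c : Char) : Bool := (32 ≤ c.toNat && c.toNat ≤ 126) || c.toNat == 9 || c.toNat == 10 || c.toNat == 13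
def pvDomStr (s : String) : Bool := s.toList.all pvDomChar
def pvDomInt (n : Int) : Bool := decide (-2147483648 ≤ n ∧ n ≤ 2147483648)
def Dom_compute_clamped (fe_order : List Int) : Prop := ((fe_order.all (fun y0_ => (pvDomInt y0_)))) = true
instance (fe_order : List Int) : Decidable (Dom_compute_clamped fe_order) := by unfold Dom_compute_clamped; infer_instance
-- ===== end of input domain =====

-- B replaces A's string processing (str/len==6/enumerate over characters) by pure integer
-- arithmetic (range test 100000..999999 and digit extraction v // 10^(5-k) % 10) and builds
-- the result by comprehensions over positive indices; objective: alternative algorithm.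

-- ===== PORT A =====
-- str(...) is ported through PySem.Int.toChars (= the character list of PySem.Int.toStr).
def compute_clamped (fe_order : List Int) : List Int × (List (Int × List Int)) :=
  -- for i in fe_order: if i < 0: clamped_nodes.append(i)
  let clamped_nodes : List Int :=
    fe_order.foldl (fun acc i => if i < 0 then acc ++ [i] else acc) []
  -- for ni in clamped_nodes: …   (fe_order[ni] with negative index: pyGetD, exact under Pre_)
  let freeDoF : PySem.Dict Int (List Int) :=
    clamped_nodes.foldl (fun d ni =>
      let fe_ni := PySem.Int.toChars |PySem.List.pyGetD fe_order ni 0|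
      if fe_ni.length = 6 then
        d.insert ni (((PySem.List.enumerate fe_ni).filter (fun p => p.2 == '0')).map (·.1))
      else
        d.insert ni []) PySem.Dict.empty
  (clamped_nodes, freeDoF.items)

-- ===== PORT B =====
-- _free_dof: arithmetic 6-digit test and digit extraction, no string conversion
def pvFreeDof (v : Int) : List Int :=
  if 100000 ≤ v ∧ v ≤ 999999 then
    (PySem.List.pyRange 0 6 1).filter
      (fun k => PySem.Int.mod (PySem.Int.floordiv v ((10 : Int) ^ (5 - k).toNat)) 10 == 0)
  else []

def compute_clamped_alt (fe_order : List Int) : List Int × (List (Int × List Int)) :=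
  let n : Int := PySem.List.len fe_order
  let clamped_nodes : List Int := fe_order.filter (fun i => decide (i < 0))
  let freeDoF : PySem.Dict Int (List Int) :=
    clamped_nodes.foldl
      (fun d i => d.insert i (pvFreeDof |PySem.List.pyGetD fe_order (n + i) 0|))
      PySem.Dict.empty
  (clamped_nodes, freeDoF.items)

-- ===== PRECONDITION & SPEC =====
-- A indexes fe_order by each negative value ni itself (fe_order[ni]); Pre_ excludes exactly
-- the inputs where that negative index is out of range, i.e. where Python raises IndexError.
def Pre_compute_clamped (fe_order : List Int) : Prop :=
  ∀ i ∈ fe_order, i < 0 → PySem.Raise.InRange fe_order.length i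
instance (fe_order : List Int) : Decidable (Pre_compute_clamped fe_order) := by
  unfold Pre_compute_clamped; infer_instance

def pvWitness_compute_clamped : List Int := [-1, 100100]

def Spec_compute_clamped (fe_order : List Int) (out : List Int × (List (Int × List Int))) : Prop := out = compute_clamped_alt fe_order
instance (fe_order : List Int) (out : List Int × (List (Int × List Int))) : Decidable (Spec_compute_clamped fe_order out) := by unfold Spec_compute_clamped; infer_instance

-- ===== CLAIM (what is proved, stated in full; the proofs are below) =====
def Claim_equal_compute_clamped : Prop := ∀ (fe_order : List Int), Dom_compute_clamped fe_order → Pre_compute_clamped fe_order → Spec_compute_clamped fe_order (compute_clamped fe_order)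

-- ===== LEMMAS AND PROOFS =====

-- one unfolding step of core's digit loop
theorem pvTdcStep (b f n : Nat) (l : List Char) :
    Nat.toDigitsCore b (f + 1) n l =
      if n / b = 0 then Nat.digitChar (n % b) :: l
      else Nat.toDigitsCore b f (n / b) (Nat.digitChar (n % b) :: l) := rfl

-- the digit loop, characterised: a number in [10^k, 10^(k+1)) yields its k+1 decimal digits
theorem pvTdcChar : ∀ (k f n : Nat) (l : List Char), k < f → 10 ^ k ≤ n → n < 10 ^ (k + 1) →
    Nat.toDigitsCore 10 f n l =
      (((List.range (k + 1)).map (fun j => Nat.digitChar (n / 10 ^ j % 10))).reverse) ++ l := by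
  intro k
  induction k with
  | zero =>
    intro f n l hf h1 h2
    obtain ⟨f', rfl⟩ : ∃ f', f = f' + 1 := ⟨f - 1, by omega⟩
    rw [pvTdcStep]
    have h2' : n < 10 := by simpa using h2
    rw [if_pos (Nat.div_eq_of_lt h2')]
    simp [Nat.mod_eq_of_lt h2']
  | succ k ih =>
    intro f n l hf h1 h2
    obtain ⟨f', rfl⟩ : ∃ f', f = f' + 1 := ⟨f - 1, by omega⟩
    rw [pvTdcStep]
    have h10 : (10 : Nat) ≤ 10 ^ (k + 1) := by
      calc (10:Nat) = 10 ^ 1 := by norm_num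
      _ ≤ 10 ^ (k + 1) := Nat.pow_le_pow_right (by norm_num) (by omega)
    have hne : n / 10 ≠ 0 := by
      have : 10 ≤ n := le_trans h10 h1
      have := Nat.one_le_div_iff (by norm_num : 0 < 10) |>.mpr this
      omega
    rw [if_neg hne]
    have hb1 : 10 ^ k ≤ n / 10 := by
      rw [Nat.le_div_iff_mul_le (by norm_num)]
      calc 10 ^ k * 10 = 10 ^ (k + 1) := (pow_succ 10 k).symm
      _ ≤ n := h1
    have hb2 : n / 10 < 10 ^ (k + 1) := by
      rw [Nat.div_lt_iff_lt_mul (by norm_num)]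
      calc n < 10 ^ (k + 2) := h2
      _ = 10 ^ (k + 1) * 10 := pow_succ 10 (k + 1)
    rw [ih f' (n / 10) _ (by omega) hb1 hb2]
    conv_rhs => rw [List.range_succ_eq_map, List.map_cons, List.map_map, List.reverse_cons,
      List.append_assoc, List.singleton_append]
    simp only [pow_zero, Nat.div_one]
    refine congrArg (fun t => List.reverse t ++ (Nat.digitChar (n % 10) :: l)) ?_
    apply List.map_congr_left
    intro j _
    simp [Nat.div_div_eq_div_mul, pow_succ, mul_comm, Function.comp]
theorem pvToDigitsEq (k n : Nat) (h1 : 10 ^ k ≤ n) (h2 : n < 10 ^ (k + 1)) :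
    Nat.toDigits 10 n =
      ((List.range (k + 1)).map (fun j => Nat.digitChar (n / 10 ^ j % 10))).reverse := by
  have hk : k < 10 ^ k := Nat.lt_pow_self (by norm_num)
  unfold Nat.toDigits
  rw [pvTdcChar k (n + 1) n [] (by omega) h1 h2, List.append_nil]

theorem pvToDigitsLen (k n : Nat) (h1 : 10 ^ k ≤ n) (h2 : n < 10 ^ (k + 1)) :
    (Nat.toDigits 10 n).length = k + 1 := by
  rw [pvToDigitsEq k n h1 h2]; simp

-- for |n| ≤ 2^31, str(n) has 6 characters iff 100000 ≤ n ≤ 999999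
theorem pvLen6Iff (n : Nat) (hn : n ≤ 2147483648) :
    (Nat.toDigits 10 n).length = 6 ↔ 100000 ≤ n ∧ n < 1000000 := by
  constructor
  · intro h
    by_contra hc
    rcases Nat.lt_or_ge n 100000 with hlt | hge
    · have := Nat.toDigits_length 10 n 5 (by norm_num) (by norm_num; omega)
      omega
    · have hge6 : 1000000 ≤ n := by omega
      rcases Nat.lt_or_ge n 10000000 with h7 | h7
      · have := pvToDigitsLen 6 n (by norm_num; omega) (by norm_num; omega); omega
      rcases Nat.lt_or_ge n 100000000 with h8 | h8
      · have := pvToDigitsLen 7 n (by norm_num; omega) (by norm_num; omega); omega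
      rcases Nat.lt_or_ge n 1000000000 with h9 | h9
      · have := pvToDigitsLen 8 n (by norm_num; omega) (by norm_num; omega); omega
      · have := pvToDigitsLen 9 n (by norm_num; omega) (by norm_num; omega); omega
  · intro h
    exact pvToDigitsLen 5 n (by norm_num; omega) (by norm_num; omega)

theorem pvDigitCharBeq (d : Nat) (hd : d < 10) : (Nat.digitChar d == '0') = (d == 0) := by
  interval_cases d <;> decide

-- B's arithmetic digit test equals A's character test, digit by digit
theorem pvCondEq (v j : Nat) :
    (PySem.Int.mod (PySem.Int.floordiv ((v : Int)) ((10 : Int) ^ j)) 10 == 0)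
      = (Nat.digitChar (v / 10 ^ j % 10) == '0') := by
  rw [pvDigitCharBeq _ (Nat.mod_lt _ (by norm_num))]
  have hp : ((10 : Int) ^ j) = ((10 ^ j : Nat) : Int) := by push_cast; ring
  rw [hp, PySem.Int.floordiv_natCast]
  have hm : PySem.Int.mod ((v / 10 ^ j : Nat) : Int) 10 = ((v / 10 ^ j % 10 : Nat) : Int) := by
    exact_mod_cast PySem.Int.mod_natCast (v / 10 ^ j) 10
  rw [hm, beq_eq_decide, beq_eq_decide, decide_eq_decide]
  exact Int.natCast_eq_zero

-- enumerate-filter-map over the characters equals a filter of the index range,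
-- when the index predicate matches the character test position by position
theorem pvFilterRangeEq : ∀ (cs : List Char) (k : Int) (q : Int → Bool),
    (∀ (j : Nat), (hj : j < cs.length) → q (k + (j : Int)) = (cs[j] == '0')) →
    ((PySem.List.enumerate cs k).filter (fun p => p.2 == '0')).map (·.1)
      = (PySem.List.pyRange k (k + (cs.length : Int)) 1).filter q := by
  intro cs
  induction cs with
  | nil =>
    intro k q hq
    simp [PySem.List.enumerate, PySem.List.pyRange_one_eq_nil]
  | cons c cs ih =>
    intro k q hq
    have hhead : q k = (c == '0') := by simpa using hq 0 (by simp)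
    have htail := ih (k + 1) q (fun j hj => by
      have h1 := hq (j + 1) (by simpa using Nat.succ_lt_succ hj)
      have h2 : k + ((j + 1 : Nat) : Int) = k + 1 + (j : Int) := by push_cast; ring
      rw [h2] at h1
      simpa using h1)
    rw [PySem.List.pyRange_one_cons (by simp only [List.length_cons]; push_cast; omega)]
    simp only [PySem.List.enumerate_cons, List.filter_cons, List.length_cons]
    have hrange : k + ((cs.length + 1 : Nat) : Int) = (k + 1) + (cs.length : Int) := by
      push_cast; ring
    rw [hrange, hhead]
    by_cases hc : (c == '0') = true
    · simp only [hc, if_true, List.map_cons, htail]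
    · simp only [Bool.not_eq_true] at hc
      simp only [hc, Bool.false_eq_true, if_false, htail]

theorem pvToCharsAbs (x : Int) : PySem.Int.toChars |x| = Nat.toDigits 10 x.natAbs := by
  rw [PySem.Int.toChars, if_neg (not_lt_of_ge (abs_nonneg x)), ← Int.natCast_natAbs,
    Int.toNat_natCast]

-- the per-clamped-node value: A's string computation equals B's arithmetic one
theorem pvDofEq (x : Int) (hx : x.natAbs ≤ 2147483648) :
    (if (PySem.Int.toChars |x|).length = 6
     then ((PySem.List.enumerate (PySem.Int.toChars |x|)).filter (fun p => p.2 == '0')).map (·.1)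
     else []) = pvFreeDof |x| := by
  rw [pvToCharsAbs]
  have habs : |x| = (x.natAbs : Int) := by rw [Int.natCast_natAbs]
  rw [pvFreeDof, habs]
  set v := x.natAbs with hv
  by_cases h : 100000 ≤ v ∧ v < 1000000
  · rw [if_pos ((pvLen6Iff v hx).mpr h),
      if_pos (show (100000 : ℤ) ≤ (v : ℤ) ∧ (v : ℤ) ≤ 999999 by omega)]
    rw [pvToDigitsEq 5 v (by norm_num; omega) (by norm_num; omega)]
    show ((PySem.List.enumerate [Nat.digitChar (v / 10 ^ 5 % 10), Nat.digitChar (v / 10 ^ 4 % 10),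
        Nat.digitChar (v / 10 ^ 3 % 10), Nat.digitChar (v / 10 ^ 2 % 10),
        Nat.digitChar (v / 10 ^ 1 % 10), Nat.digitChar (v / 10 ^ 0 % 10)]).filter
        (fun p => p.2 == '0')).map (·.1) = _
    rw [pvFilterRangeEq _ 0 (fun k => PySem.Int.mod (PySem.Int.floordiv ((v : ℤ)) ((10 : Int) ^ (5 - k).toNat)) 10 == 0) ?hq]
    · norm_num
    case hq =>
      intro j hj
      simp only [List.length_cons, List.length_nil] at hj
      interval_cases j
      · simpa using pvCondEq v 5
      · simpa using pvCondEq v 4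
      · simpa using pvCondEq v 3
      · simpa using pvCondEq v 2
      · simpa using pvCondEq v 1
      · simpa using pvCondEq v 0
  · rw [if_neg (fun hc => h ((pvLen6Iff v hx).mp hc)),
      if_neg (show ¬ ((100000 : ℤ) ≤ (v : ℤ) ∧ (v : ℤ) ≤ 999999) by omega)]

-- negative in-range indexing shifted by the length gives the same element
theorem pvGetShift (xs : List Int) (i : Int) (d : Int) (hneg : i < 0)
    (hr : PySem.Raise.InRange xs.length i) :
    PySem.List.pyGetD xs (↑xs.length + i) d = PySem.List.pyGetD xs i d := by
  obtain ⟨h2, _⟩ := hr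
  have h1 : ¬ (0 : Int) ≤ i := by omega
  have h3 : (0 : Int) ≤ ↑xs.length + i := by omega
  have h4 : (↑xs.length : Int) + i < ↑xs.length := by omega
  simp only [PySem.List.pyGetD, PySem.List.pyGet?, PySem.List.pyIdx?]
  rw [if_neg h1, if_pos h2, if_pos h3, if_pos h4]
  have : ((↑xs.length : Int) + i).toNat = xs.length - (-i).toNat := by omega
  rw [this]

-- ===== VERDICT (by name: the statement is the Claim_ definition above) =====
theorem compute_clamped_spec : Claim_equal_compute_clamped := by
  intro fe_order hdom hpre
  unfold Spec_compute_clamped compute_clamped compute_clamped_alt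
  rw [show (fe_order.foldl (fun acc i => if i < 0 then acc ++ [i] else acc) []) =
      fe_order.filter (fun i => decide (i < 0)) from by
    simpa using PySem.List.foldl_append_ite_eq_filter (fun i => i < 0) fe_order []]
  refine congrArg (Prod.mk _) (congrArg PySem.Dict.items ?_)
  apply PySem.List.foldl_congr_mem
  intro d ni hni
  rw [List.mem_filter] at hni
  obtain ⟨hmem, hlt0⟩ := hni
  have hlt : ni < 0 := by simpa using hlt0
  have hr : PySem.Raise.InRange fe_order.length ni := hpre ni hmem hlt
  simp only [PySem.List.len_eq]
  rw [pvGetShift fe_order ni 0 hlt hr]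
  have hxmem : PySem.List.pyGetD fe_order ni 0 ∈ fe_order := PySem.List.pyGetD_mem fe_order 0 hr
  have hxdom : pvDomInt (PySem.List.pyGetD fe_order ni 0) = true := by
    rw [Dom_compute_clamped, List.all_eq_true] at hdom
    exact hdom _ hxmem
  have hxabs : (PySem.List.pyGetD fe_order ni 0).natAbs ≤ 2147483648 := by
    simp only [pvDomInt, decide_eq_true_eq] at hxdom
    omega
  rw [← pvDofEq _ hxabs]
  split_ifs <;> rfl
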